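-- pv_equiv track=rewrite | github.com/mkbabb/words | backend/src/floridify/text/normalize.py | _build_lemma_indices
-- ===== SOURCE A (Python) =====
-- def _build_lemma_indices(
--     lemmas: list[str],
-- ) -> tuple[list[str], list[int], list[int]]:
--     """Build unique lemmas and indices from a list of lemmas."""
--     seen_lemmas: set[str] = set()
--     unique_lemmas: list[str] = []
--     lemma_to_index: dict[str, int] = {}
--     word_to_lemma_indices: list[int] = []
--     lemma_to_word_indices: list[int] = []
--
--     for word_idx, lemma in enumerate(lemmas):
--         if not lemma:
--             word_to_lemma_indices.append(-1)
--             continue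
--
--         if lemma not in seen_lemmas:
--             seen_lemmas.add(lemma)
--             lemma_idx = len(unique_lemmas)
--             unique_lemmas.append(lemma)
--             lemma_to_index[lemma] = lemma_idx
--             lemma_to_word_indices.append(word_idx)
--         else:
--             lemma_idx = lemma_to_index[lemma]
--
--         word_to_lemma_indices.append(lemma_idx)
--
--     return unique_lemmas, word_to_lemma_indices, lemma_to_word_indices
-- ===== SOURCE B (Python) =====
-- def _build_lemma_indices(
--     lemmas: list[str],
-- ) -> tuple[list[str], list[int], list[int]]:
--     """Build unique lemmas and indices from a list of lemmas."""
--     # first occurrences: positions whose lemma is non-empty and unseen in the prefix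
--     lemma_to_word_indices = [
--         i for i, lemma in enumerate(lemmas) if lemma and lemma not in lemmas[:i]
--     ]
--     unique_lemmas = [lemmas[i] for i in lemma_to_word_indices]
--     word_to_lemma_indices = [
--         unique_lemmas.index(lemma) if lemma else -1 for lemma in lemmas
--     ]
--     return unique_lemmas, word_to_lemma_indices, lemma_to_word_indices
-- ===== Notes on version B (the rewrite author's own statement) =====
-- stated objective: simpler
-- what changed: Drops A's seen-set and dict entirely: B is three comprehensions using prefix membership (lemma not in lemmas[:i]) to find first occurrences and list.index to rank each word, trading A's O(n) hash bookkeeping for shorter O(n^2) scans.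
import Mathlib
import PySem

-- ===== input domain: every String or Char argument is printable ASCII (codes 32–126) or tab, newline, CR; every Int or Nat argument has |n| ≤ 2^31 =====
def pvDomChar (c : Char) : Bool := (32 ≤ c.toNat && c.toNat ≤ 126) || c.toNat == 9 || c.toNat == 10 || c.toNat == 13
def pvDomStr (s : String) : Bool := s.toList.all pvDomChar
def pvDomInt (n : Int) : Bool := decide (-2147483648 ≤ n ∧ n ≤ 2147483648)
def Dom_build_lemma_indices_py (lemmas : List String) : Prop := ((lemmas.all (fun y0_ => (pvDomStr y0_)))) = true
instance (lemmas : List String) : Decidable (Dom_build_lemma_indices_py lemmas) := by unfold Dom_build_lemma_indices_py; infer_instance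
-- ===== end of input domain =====

-- B drops A's seen-set and dict for three prefix-membership/list.index comprehensions:
-- simpler (shorter, no hash bookkeeping), at O(n^2) scan cost instead of A's O(n).

-- ===== PORT A =====
-- loop body of A's single fused 'for word_idx, lemma in enumerate(lemmas)' loop;
-- state = (seen_lemmas, unique_lemmas, lemma_to_index, word_to_lemma_indices, lemma_to_word_indices)
def blipStepA
    (st : PySem.Set String × List String × PySem.Dict String Int × List Int × List Int)
    (e : Int × String) :
    PySem.Set String × List String × PySem.Dict String Int × List Int × List Int :=
  let (seen, uniq, d, w2l, l2w) := st
  let (word_idx, lem) := e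
  if lem = "" then
    (seen, uniq, d, w2l ++ [(-1 : Int)], l2w)
  else if ¬ seen.contains lem then
    let lemma_idx : Int := (uniq.length : Int)
    (PySem.Set.add seen lem, uniq ++ [lem], d.insert lem lemma_idx,
     w2l ++ [lemma_idx], l2w ++ [word_idx])
  else
    -- lemma_to_index[lemma]: the key is always present here (seen tracks the dict's keys),
    -- so Python's lookup never raises; getD's default is unreachable
    let lemma_idx : Int := d.getD lem 0
    (seen, uniq, d, w2l ++ [lemma_idx], l2w)

def build_lemma_indices_py (lemmas : List String) : List String × List Int × List Int :=
  let st := (PySem.List.enumerate lemmas).foldl blipStepA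
    (PySem.Set.empty, [], PySem.Dict.empty, [], [])
  (st.2.1, st.2.2.2.1, st.2.2.2.2)

-- ===== PORT B =====
def build_lemma_indices_py_alt (lemmas : List String) : List String × List Int × List Int :=
  -- [i for i, lemma in enumerate(lemmas) if lemma and lemma not in lemmas[:i]]
  let lemma_to_word_indices : List Int :=
    (PySem.List.enumerate lemmas).filterMap (fun e =>
      if e.2 ≠ "" ∧ ¬ (PySem.List.slice lemmas none (some e.1)).contains e.2
      then some e.1 else none)
  -- [lemmas[i] for i in lemma_to_word_indices]  (every i is a valid index, so never raises)
  let unique_lemmas : List String :=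
    lemma_to_word_indices.map (fun i => PySem.List.pyGetD lemmas i "")
  -- [unique_lemmas.index(lemma) if lemma else -1 for lemma in lemmas]
  -- (every non-empty lemma occurs in unique_lemmas, so .index never raises)
  let word_to_lemma_indices : List Int :=
    lemmas.map (fun l =>
      if l = "" then (-1 : Int)
      else (((PySem.List.index? unique_lemmas l).getD 0 : Nat) : Int))
  (unique_lemmas, word_to_lemma_indices, lemma_to_word_indices)

-- ===== PRECONDITION & SPEC =====
def Spec_build_lemma_indices_py (lemmas : List String) (out : List String × List Int × List Int) : Prop := out = build_lemma_indices_py_alt lemmas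
instance (lemmas : List String) (out : List String × List Int × List Int) : Decidable (Spec_build_lemma_indices_py lemmas out) := by unfold Spec_build_lemma_indices_py; infer_instance

-- ===== CLAIM (what is proved, stated in full; the proofs are below) =====
def Claim_equal_build_lemma_indices_py : Prop := ∀ (lemmas : List String), Dom_build_lemma_indices_py lemmas → Spec_build_lemma_indices_py lemmas (build_lemma_indices_py lemmas)

-- ===== LEMMAS AND PROOFS =====

-- first-occurrence list of the non-empty lemmas of a list, continued from an accumulator u
def firstsFrom (u : List String) (rest : List String) : List String :=
  rest.foldl (fun u l => if l ≠ "" ∧ ¬ u.contains l then u ++ [l] else u) u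

lemma firstsFrom_cons (u : List String) (l : String) (rest : List String) :
    firstsFrom u (l :: rest)
      = firstsFrom (if l ≠ "" ∧ ¬ u.contains l then u ++ [l] else u) rest := rfl

lemma firstsFrom_append (u p rest : List String) :
    firstsFrom u (p ++ rest) = firstsFrom (firstsFrom u p) rest := by
  simp [firstsFrom, List.foldl_append]

lemma firstsFrom_append_exists (u rest : List String) :
    ∃ t, firstsFrom u rest = u ++ t := by
  induction rest generalizing u with
  | nil => exact ⟨[], by simp [firstsFrom]⟩
  | cons l rest ih =>
    rw [firstsFrom_cons]
    split
    · obtain ⟨t, ht⟩ := ih (u ++ [l])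
      exact ⟨l :: t, by simp [ht]⟩
    · exact ih u

lemma mem_firstsFrom (u rest : List String) (l : String) (hl : l ≠ "") :
    l ∈ firstsFrom u rest ↔ l ∈ u ∨ l ∈ rest := by
  induction rest generalizing u with
  | nil => simp [firstsFrom]
  | cons x rest ih =>
    rw [firstsFrom_cons]
    by_cases hx : l = x
    · subst hx
      split
    
      · next h =>
        rw [ih]
        simp [List.mem_append]
      · next h =>
        rw [ih]
        rw [Classical.not_and_iff_not_or_not] at h
        rcases h with h | h
        · simp at h; exact absurd h hl
        · rw [not_not, List.contains_iff_mem] at h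
          simp [h]
    · split
      · next h =>
        rw [ih]
        simp [List.mem_append, hx]
      · next h =>
        rw [ih]
        simp [hx]

-- membership in the firsts of a prefix is membership in the prefix (for non-empty lemmas)
lemma mem_firsts_iff (p : List String) (l : String) (hl : l ≠ "") :
    l ∈ firstsFrom [] p ↔ l ∈ p := by
  rw [mem_firstsFrom [] p l hl]; simp

-- index? into a later firstsFrom is stable for keys already present
lemma index?_firstsFrom_of_mem (u rest : List String) (l : String) (hm : l ∈ u) :
    PySem.List.index? (firstsFrom u rest) l = PySem.List.index? u l := by
  obtain ⟨t, ht⟩ := firstsFrom_append_exists u rest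
  rw [ht, PySem.List.index?_append_of_mem t hm]

-- B's uniq reconstruction: reading lemmas back at the first-occurrence positions
-- yields exactly the part of the firsts list beyond the prefix p.
lemma firsts_map_back (rest p : List String) :
    firstsFrom (firstsFrom [] p) rest
      = firstsFrom [] p ++
        ((PySem.List.enumerate rest (p.length : Int)).filterMap (fun e =>
            if e.2 ≠ "" ∧ ¬ (PySem.List.slice (p ++ rest) none (some e.1)).contains e.2
            then some e.1 else none)).map
          (fun i => PySem.List.pyGetD (p ++ rest) i "") := by
  induction rest generalizing p with
  | nil => simp [firstsFrom, PySem.List.enumerate_nil]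
  | cons l rest ih =>
    have hsl : PySem.List.slice (p ++ l :: rest) none (some (p.length : Int)) = p := by
      rw [PySem.List.slice_to_natCast]; simp
    have hget : PySem.List.pyGetD (p ++ l :: rest) (p.length : Int) "" = l := by
      rw [PySem.List.pyGetD_natCast]
      simp [List.getD_eq_getElem?_getD]
    have hstart : ((p.length : Int) + 1) = (((p ++ [l]).length : Nat) : Int) := by simp
    have happ : p ++ l :: rest = (p ++ [l]) ++ rest := by simp
    rw [firstsFrom_cons, PySem.List.enumerate_cons, List.filterMap_cons]
    by_cases hcond : l ≠ "" ∧ ¬ (firstsFrom [] p).contains l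
    · -- first occurrence: both sides extend
      have hlp : l ∉ p := fun h => hcond.2 (by
        rw [List.contains_iff_mem]; exact (mem_firsts_iff p l hcond.1).mpr h)
      have hff : firstsFrom [] (p ++ [l]) = firstsFrom [] p ++ [l] := by
        rw [firstsFrom_append, firstsFrom_cons, if_pos hcond]; rfl
      rw [if_pos hcond, if_pos ⟨hcond.1, by simpa [hsl, List.contains_iff_mem] using hlp⟩]
      rw [List.map_cons, hget, hstart, happ]
      have := ih (p ++ [l])
      rw [hff] at this
      rw [this]
      simp
    · -- empty or already seen: both sides skip
      have hff : firstsFrom [] (p ++ [l]) = firstsFrom [] p := by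
        rw [firstsFrom_append, firstsFrom_cons, if_neg hcond]; rfl
      have hcond' : ¬ (l ≠ "" ∧ ¬ (PySem.List.slice (p ++ l :: rest) none (some (p.length : Int))).contains l) := by
        rw [Classical.not_and_iff_not_or_not] at hcond ⊢
        rcases hcond with h | h
        · exact Or.inl h
        · rw [not_not, List.contains_iff_mem] at h
          by_cases hl : l = ""
          · exact Or.inl (by simp [hl])
          · exact Or.inr (by
              rw [not_not, hsl, List.contains_iff_mem]
              exact (mem_firsts_iff p l hl).mp h)
      rw [if_neg hcond, if_neg hcond', hstart, happ]
      have := ih (p ++ [l])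
      rw [hff] at this
      rw [this]

-- Main loop invariant: A's fused fold, started after a processed prefix p, produces
-- B's three closed forms over the full list.
lemma blip_main (rest p : List String) (seen : PySem.Set String)
    (d : PySem.Dict String Int) (w2l l2w : List Int)
    (hseen : seen = firstsFrom [] p)
    (hd : ∀ l, d.get? l = (PySem.List.index? (firstsFrom [] p) l).map (fun n => ((n : Nat) : Int))) :
    ∃ seen' d',
      (PySem.List.enumerate rest (p.length : Int)).foldl blipStepA
          (seen, firstsFrom [] p, d, w2l, l2w)
        = (seen', firstsFrom (firstsFrom [] p) rest, d',
           w2l ++ rest.map (fun l =>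
             if l = "" then (-1 : Int)
             else (((PySem.List.index? (firstsFrom (firstsFrom [] p) rest) l).getD 0 : Nat) : Int)),
           l2w ++ (PySem.List.enumerate rest (p.length : Int)).filterMap (fun e =>
             if e.2 ≠ "" ∧ ¬ (PySem.List.slice (p ++ rest) none (some e.1)).contains e.2
             then some e.1 else none)) := by
  induction rest generalizing p seen d w2l l2w with
  | nil =>
    exact ⟨seen, d, by simp [firstsFrom, PySem.List.enumerate_nil]⟩
  | cons l rest ih =>
    have hsl : PySem.List.slice (p ++ l :: rest) none (some (p.length : Int)) = p := by
      rw [PySem.List.slice_to_natCast]; simp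
    have hstart : ((p.length : Int) + 1) = (((p ++ [l]).length : Nat) : Int) := by simp
    have happ : p ++ l :: rest = (p ++ [l]) ++ rest := by simp
    rw [PySem.List.enumerate_cons, List.foldl_cons]
    by_cases hl : l = ""
    · -- empty lemma: append -1, state unchanged
      subst hl
      have hff : firstsFrom [] (p ++ [""]) = firstsFrom [] p := by
        rw [firstsFrom_append, firstsFrom_cons, if_neg (by simp)]; rfl
      have hffc : firstsFrom (firstsFrom [] p) ("" :: rest) = firstsFrom (firstsFrom [] p) rest := by
        rw [firstsFrom_cons, if_neg (by simp)]
      have hstep : blipStepA (seen, firstsFrom [] p, d, w2l, l2w) ((p.length : Int), "")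
          = (seen, firstsFrom [] p, d, w2l ++ [(-1 : Int)], l2w) := by
        simp [blipStepA]
      have hnone : (fun (e : Int × String) =>
            if e.2 ≠ "" ∧ ¬ (PySem.List.slice (p ++ "" :: rest) none (some e.1)).contains e.2
            then some e.1 else none) ((p.length : Int), "") = none := by
        simp
      have hfm := List.filterMap_cons_none
        (f := fun (e : Int × String) =>
          if e.2 ≠ "" ∧ ¬ (PySem.List.slice (p ++ "" :: rest) none (some e.1)).contains e.2
          then some e.1 else none)
        (a := ((p.length : Int), ""))
        (l := PySem.List.enumerate rest ((p.length : Int) + 1)) hnone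
      rw [hstep, hffc, List.map_cons,
          if_pos (show ("" : String) = "" from rfl), hfm, hstart, happ]
      obtain ⟨seen', d', hres⟩ := ih (p ++ [""]) seen d (w2l ++ [(-1 : Int)]) l2w
        (by rw [hseen, hff]) (by intro m; rw [hd m, hff])
      rw [hff] at hres
      refine ⟨seen', d', ?_⟩
      rw [hres]
      simp
    · by_cases hmem : l ∈ firstsFrom [] p
      · -- already seen: look the index up in the dict
        obtain ⟨k, hk⟩ : ∃ k, PySem.List.index? (firstsFrom [] p) l = some k :=
          Option.isSome_iff_exists.mp ((PySem.List.index?_isSome_iff _ _).mpr hmem)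
        have hgetd : d.getD l 0 = ((k : Nat) : Int) := by
          rw [PySem.Dict.getD_eq_get?_getD, hd l, hk]; rfl
        have hstep : blipStepA (seen, firstsFrom [] p, d, w2l, l2w) ((p.length : Int), l)
            = (seen, firstsFrom [] p, d, w2l ++ [((k : Nat) : Int)], l2w) := by
          simp [blipStepA, hl, PySem.Set.contains, hseen, hmem, hgetd]
        have hff : firstsFrom [] (p ++ [l]) = firstsFrom [] p := by
          rw [firstsFrom_append, firstsFrom_cons, if_neg (by simp [hmem])]
          rfl
        have hffc : firstsFrom (firstsFrom [] p) (l :: rest) = firstsFrom (firstsFrom [] p) rest := by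
          rw [firstsFrom_cons, if_neg (by simp [hmem])]
        have hcond' : ¬ (l ≠ "" ∧ ¬ (PySem.List.slice (p ++ l :: rest) none (some (p.length : Int))).contains l) := by
          rw [Classical.not_and_iff_not_or_not]
          refine Or.inr ?_
          rw [not_not, hsl, List.contains_iff_mem]
          exact (mem_firsts_iff p l hl).mp hmem
        have hnone : (fun (e : Int × String) =>
            if e.2 ≠ "" ∧ ¬ (PySem.List.slice (p ++ l :: rest) none (some e.1)).contains e.2
            then some e.1 else none) ((p.length : Int), l) = none := if_neg hcond'
        have hidx : PySem.List.index? (firstsFrom (firstsFrom [] p) rest) l = some k := by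
          rw [index?_firstsFrom_of_mem _ _ _ hmem, hk]
        have hfm := List.filterMap_cons_none
          (f := fun (e : Int × String) =>
            if e.2 ≠ "" ∧ ¬ (PySem.List.slice (p ++ l :: rest) none (some e.1)).contains e.2
            then some e.1 else none)
          (a := ((p.length : Int), l))
          (l := PySem.List.enumerate rest ((p.length : Int) + 1)) hnone
        rw [hstep, hffc, List.map_cons, if_neg hl, hidx, hfm, hstart, happ]
        obtain ⟨seen', d', hres⟩ := ih (p ++ [l]) seen d (w2l ++ [((k : Nat) : Int)]) l2w
          (by rw [hseen, hff]) (by intro m; rw [hd m, hff])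
        rw [hff] at hres
        refine ⟨seen', d', ?_⟩
        rw [hres]
        simp
      · -- first occurrence: insert into dict, extend uniq
        have hstep : blipStepA (seen, firstsFrom [] p, d, w2l, l2w) ((p.length : Int), l)
            = (firstsFrom [] p ++ [l], firstsFrom [] p ++ [l],
               d.insert l ((firstsFrom [] p).length : Int),
               w2l ++ [((firstsFrom [] p).length : Int)], l2w ++ [(p.length : Int)]) := by
          simp [blipStepA, hl, PySem.Set.contains, hseen, hmem, PySem.Set.add]
        have hff : firstsFrom [] (p ++ [l]) = firstsFrom [] p ++ [l] := by
          rw [firstsFrom_append, firstsFrom_cons, if_pos ⟨hl, by simpa using hmem⟩]; rfl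
        have hffc : firstsFrom (firstsFrom [] p) (l :: rest) = firstsFrom (firstsFrom [] p ++ [l]) rest := by
          rw [firstsFrom_cons, if_pos ⟨hl, by simpa using hmem⟩]
        have hd' : ∀ m, (d.insert l ((firstsFrom [] p).length : Int)).get? m
            = (PySem.List.index? (firstsFrom [] p ++ [l]) m).map (fun n => ((n : Nat) : Int)) := by
          intro m
          by_cases hm : m = l
          · subst hm
            rw [PySem.Dict.get?_insert_self,
                PySem.List.index?_append_singleton_self _ _ hmem]
            rfl
          · rw [PySem.Dict.get?_insert_of_ne _ _ hm, hd m]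
            by_cases hmu : m ∈ firstsFrom [] p
            · rw [PySem.List.index?_append_of_mem [l] hmu]
            · rw [(PySem.List.index?_eq_none_iff _ _).mpr hmu,
                  (PySem.List.index?_eq_none_iff _ _).mpr (by simp [hmu, hm])]
        have hcond : (l ≠ "" ∧ ¬ (PySem.List.slice (p ++ l :: rest) none (some (p.length : Int))).contains l) := by
          refine ⟨hl, ?_⟩
          rw [hsl, List.contains_iff_mem]
          intro h
          exact hmem ((mem_firsts_iff p l hl).mpr h)
        have hsome : (fun (e : Int × String) =>
            if e.2 ≠ "" ∧ ¬ (PySem.List.slice (p ++ l :: rest) none (some e.1)).contains e.2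
            then some e.1 else none) ((p.length : Int), l) = some (p.length : Int) := if_pos hcond
        have hidx : PySem.List.index? (firstsFrom (firstsFrom [] p ++ [l]) rest) l
            = some (firstsFrom [] p).length := by
          rw [index?_firstsFrom_of_mem _ _ _ (by simp),
              PySem.List.index?_append_singleton_self _ _ hmem]
        have hfm := List.filterMap_cons_some
          (f := fun (e : Int × String) =>
            if e.2 ≠ "" ∧ ¬ (PySem.List.slice (p ++ l :: rest) none (some e.1)).contains e.2
            then some e.1 else none)
          (a := ((p.length : Int), l))
          (l := PySem.List.enumerate rest ((p.length : Int) + 1)) hsome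
        rw [hstep, hffc, List.map_cons, if_neg hl, hidx, hfm, hstart, happ]
        obtain ⟨seen', d', hres⟩ := ih (p ++ [l]) (firstsFrom [] p ++ [l])
          (d.insert l ((firstsFrom [] p).length : Int))
          (w2l ++ [((firstsFrom [] p).length : Int)]) (l2w ++ [(p.length : Int)])
          (by rw [hff]) (by intro m; rw [hd' m, hff])
        rw [hff] at hres
        refine ⟨seen', d', ?_⟩
        rw [hres]
        simp

-- ===== VERDICT (by name: the statement is the Claim_ definition above) =====
theorem build_lemma_indices_py_spec : Claim_equal_build_lemma_indices_py := by
  intro lemmas _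
  unfold Spec_build_lemma_indices_py
  simp only [build_lemma_indices_py, build_lemma_indices_py_alt]
  obtain ⟨seen', d', hres⟩ := blip_main lemmas [] PySem.Set.empty PySem.Dict.empty [] []
    (by rfl)
    (by intro m
        have h1 : (PySem.Dict.empty : PySem.Dict String Int).get? m = none := rfl
        have h2 : PySem.List.index? ([] : List String) m = none :=
          (PySem.List.index?_eq_none_iff _ _).mpr (by simp)
        rw [show firstsFrom [] ([] : List String) = [] from rfl, h1, h2]
        rfl)
  have hmap := firsts_map_back lemmas []
  simp only [List.length_nil, Nat.cast_zero, List.nil_append] at hres hmap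
  have hbase : firstsFrom [] ([] : List String) = [] := rfl
  rw [hbase] at hres hmap
  rw [hres, hmap]
  simp
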